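-- pv_equiv track=rewrite | github.com/Khushal-gupta22/minor-proj-parser | displacement.py | calculate_displacement
-- ===== SOURCE A (Python) =====
-- def calculate_displacement(original_prefs, matched_pairs):
--     """
--     Calculate displacement for each entity based on their original preferences
--
--     Parameters:
--     - original_prefs: List of original preference lists
--     - matched_pairs: List of matched pairs in the current round
--
--     Returns:
--     - List of displacements
--     """
--     displacements = []
--
--     for entity_idx, entity_prefs in enumerate(original_prefs, 1):
--         # Find the matched partner for this entity
--         matched_partner = None
--         for pair in matched_pairs:
--             if pair[0] == entity_idx:
--                 matched_partner = pair[1]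
--                 break
--             elif pair[1] == entity_idx:
--                 matched_partner = pair[0]
--                 break
--
--         if matched_partner is not None:
--             # If partner is in preferences, calculate displacement
--             try:
--                 displacement = entity_prefs.index(matched_partner)
--                 displacements.append(displacement)
--             except ValueError:
--                 # If matched partner not in original preferences
--                 displacements.append(len(entity_prefs))
--         else:
--             # If no match found
--             displacements.append(len(entity_prefs))
--
--     return displacements
-- ===== SOURCE B (Python) =====
-- def calculate_displacement(original_prefs, matched_pairs):
--     n = len(original_prefs)
--     displacements = [len(prefs) for prefs in original_prefs]
--     assigned = [False] * n
--     for pair in matched_pairs: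
--         for member, partner in ((pair[0], pair[1]), (pair[1], pair[0])):
--             if 1 <= member <= n and not assigned[member - 1]:
--                 prefs = original_prefs[member - 1]
--                 try:
--                     displacements[member - 1] = prefs.index(partner)
--                 except ValueError:
--                     displacements[member - 1] = len(prefs)
--                 assigned[member - 1] = True
--     return displacements
-- ===== Notes on version B (the rewrite author's own statement) =====
-- stated objective: alternative
-- what changed: Replaces A's per-entity gather (rescanning matched_pairs inside the loop over entities) with a single scatter pass over matched_pairs that writes into a preinitialized displacement list guarded by an assigned-flag list.
import Mathlib
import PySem

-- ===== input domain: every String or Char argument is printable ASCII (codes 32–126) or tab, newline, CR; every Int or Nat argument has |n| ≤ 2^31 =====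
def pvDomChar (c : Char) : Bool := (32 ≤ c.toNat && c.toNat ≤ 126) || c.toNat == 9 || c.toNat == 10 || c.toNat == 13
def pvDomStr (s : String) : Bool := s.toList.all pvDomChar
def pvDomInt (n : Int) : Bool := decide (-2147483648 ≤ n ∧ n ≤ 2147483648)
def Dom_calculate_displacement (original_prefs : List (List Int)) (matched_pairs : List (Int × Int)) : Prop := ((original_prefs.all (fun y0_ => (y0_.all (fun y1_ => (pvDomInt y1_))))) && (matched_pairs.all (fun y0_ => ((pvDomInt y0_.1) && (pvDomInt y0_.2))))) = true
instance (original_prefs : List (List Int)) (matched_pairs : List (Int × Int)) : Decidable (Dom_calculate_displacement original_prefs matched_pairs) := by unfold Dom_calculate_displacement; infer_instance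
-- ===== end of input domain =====

-- B replaces A's per-entity gather (a scan of matched_pairs inside the loop over entities)
-- by one initialization pass plus a single scatter pass over matched_pairs with an
-- assigned-flag list; objective: an alternative decomposition (not claimed faster).

-- `pvDispOf prefs partner` = Python `prefs.index(partner)` with ValueError ↦ len(prefs)
def pvDispOf (entity_prefs : List Int) (partner : Int) : Int :=
  match PySem.List.index? entity_prefs partner with
  | some j => (j : Int)
  | none => (entity_prefs.length : Int)

-- ===== PORT A =====
-- inner 'for pair in matched_pairs: … break' of A
def pvFindPartner (entity_idx : Int) : List (Int × Int) → Option Int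
  | [] => none
  | p :: rest =>
    if p.1 = entity_idx then some p.2
    else if p.2 = entity_idx then some p.1
    else pvFindPartner entity_idx rest

-- outer 'for entity_idx, entity_prefs in enumerate(original_prefs, 1)' of A
def pvALoop (matched_pairs : List (Int × Int)) (entity_idx : Int) : List (List Int) → List Int
  | [] => []
  | entity_prefs :: rest =>
    (match pvFindPartner entity_idx matched_pairs with
     | some partner => pvDispOf entity_prefs partner
     | none => (entity_prefs.length : Int)) :: pvALoop matched_pairs (entity_idx + 1) rest

def calculate_displacement (original_prefs : List (List Int)) (matched_pairs : List (Int × Int)) : List Int :=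
  pvALoop matched_pairs 1 original_prefs

-- ===== PORT B =====
-- body of B's inner 'for member, partner in ((pair[0],pair[1]),(pair[1],pair[0]))'
def pvAssignOne (n : Int) (original_prefs : List (List Int))
    (st : List Int × List Bool) (member partner : Int) : List Int × List Bool :=
  if 1 ≤ member ∧ member ≤ n ∧ st.2.getD (member - 1).toNat false = false then
    let prefs := original_prefs.getD (member - 1).toNat []
    (st.1.set (member - 1).toNat (pvDispOf prefs partner),
     st.2.set (member - 1).toNat true)
  else st

def calculate_displacement_alt (original_prefs : List (List Int)) (matched_pairs : List (Int × Int)) : List Int :=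
  let n : Int := original_prefs.length
  (matched_pairs.foldl
    (fun st pair =>
      pvAssignOne n original_prefs (pvAssignOne n original_prefs st pair.1 pair.2) pair.2 pair.1)
    (original_prefs.map (fun prefs => (prefs.length : Int)),
     original_prefs.map (fun _ => false))).1

-- ===== PRECONDITION & SPEC =====
def Spec_calculate_displacement (original_prefs : List (List Int)) (matched_pairs : List (Int × Int)) (out : List Int) : Prop := out = calculate_displacement_alt original_prefs matched_pairs
instance (original_prefs : List (List Int)) (matched_pairs : List (Int × Int)) (out : List Int) : Decidable (Spec_calculate_displacement original_prefs matched_pairs out) := by unfold Spec_calculate_displacement; infer_instance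

-- ===== CLAIM (what is proved, stated in full; the proofs are below) =====
def Claim_equal_calculate_displacement : Prop := ∀ (original_prefs : List (List Int)) (matched_pairs : List (Int × Int)), Dom_calculate_displacement original_prefs matched_pairs → Spec_calculate_displacement original_prefs matched_pairs (calculate_displacement original_prefs matched_pairs)

-- ===== LEMMAS AND PROOFS =====

lemma pvALoop_length (mp : List (Int × Int)) (i : Int) (l : List (List Int)) :
    (pvALoop mp i l).length = l.length := by
  induction l generalizing i with
  | nil => simp [pvALoop]
  | cons h t ih => simp [pvALoop, ih]

lemma pvALoop_getD (mp : List (Int × Int)) (l : List (List Int)) (i : Int) (k : Nat)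
    (hk : k < l.length) :
    (pvALoop mp i l).getD k 0 =
      match pvFindPartner (i + k) mp with
      | some partner => pvDispOf (l.getD k []) partner
      | none => ((l.getD k []).length : Int) := by
  induction l generalizing i k with
  | nil => simp at hk
  | cons h t ih =>
    cases k with
    | zero => simp [pvALoop, List.getD]
    | succ k =>
      have := ih (i + 1) k (by simpa using hk)
      simpa [pvALoop, List.getD, add_assoc, add_comm, add_left_comm] using this

lemma pvGetD_set_self {A : Type} (l : List A) (i : Nat) (x d : A) (h : i < l.length) :
    (l.set i x).getD i d = x := by
  simp [List.getD_eq_getElem?_getD, h]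

lemma pvGetD_set_ne {A : Type} (l : List A) (i j : Nat) (x d : A) (h : i ≠ j) :
    (l.set i x).getD j d = l.getD j d := by
  simp [List.getD_eq_getElem?_getD, h]

lemma pvAssignOne_spec (op : List (List Int)) (st : List Int × List Bool) (m p : Int) (k : Nat)
    (hk : k < op.length) (h1 : st.1.length = op.length) (h2 : st.2.length = op.length) :
    (pvAssignOne (op.length : Int) op st m p).1.length = op.length ∧
    (pvAssignOne (op.length : Int) op st m p).2.length = op.length ∧
    (if m = (k : Int) + 1 then
      ((pvAssignOne (op.length : Int) op st m p).1.getD k 0 =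
        (if st.2.getD k false = true then st.1.getD k 0 else pvDispOf (op.getD k []) p) ∧
       (pvAssignOne (op.length : Int) op st m p).2.getD k false = true)
    else
      ((pvAssignOne (op.length : Int) op st m p).1.getD k 0 = st.1.getD k 0 ∧
       (pvAssignOne (op.length : Int) op st m p).2.getD k false = st.2.getD k false)) := by
  by_cases hg : 1 ≤ m ∧ m ≤ (op.length : Int) ∧ st.2.getD (m - 1).toNat false = false
  · have hset : pvAssignOne (op.length : Int) op st m p =
        (st.1.set (m - 1).toNat (pvDispOf (op.getD (m - 1).toNat []) p),
         st.2.set (m - 1).toNat true) := by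
      unfold pvAssignOne; rw [if_pos hg]
    rw [hset]
    by_cases hm : m = (k : Int) + 1
    · have hj : (m - 1).toNat = k := by omega
      rw [hj, if_pos hm]
      have hfl : ¬ st.2.getD k false = true := by
        rw [hj] at hg; rw [hg.2.2]; simp
      refine ⟨by simp [h1], by simp [h2], ?_, ?_⟩
      · rw [if_neg hfl, pvGetD_set_self _ _ _ _ (by omega)]
      · rw [pvGetD_set_self _ _ _ _ (by omega)]
    · have hj : (m - 1).toNat ≠ k := by omega
      rw [if_neg hm]
      exact ⟨by simp [h1], by simp [h2],
        pvGetD_set_ne _ _ _ _ _ hj, pvGetD_set_ne _ _ _ _ _ hj⟩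
  · have hstEq : pvAssignOne (op.length : Int) op st m p = st := by
      unfold pvAssignOne; rw [if_neg hg]
    rw [hstEq]
    by_cases hm : m = (k : Int) + 1
    · have hj : (m - 1).toNat = k := by omega
      have hflag : st.2.getD k false = true := by
        rcases Bool.eq_false_or_eq_true (st.2.getD k false) with ht | hf
        · exact ht
        · exact absurd ⟨by omega, by omega, by rw [hj]; exact hf⟩ hg
      rw [if_pos hm, hflag]
      exact ⟨h1, h2, by simp, rfl⟩
    · rw [if_neg hm]
      exact ⟨h1, h2, rfl, rfl⟩

lemma pvAssignOne_length (n : Int) (op : List (List Int)) (st : List Int × List Bool)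
    (m p : Int) :
    (pvAssignOne n op st m p).1.length = st.1.length ∧
    (pvAssignOne n op st m p).2.length = st.2.length := by
  unfold pvAssignOne; split_ifs <;> simp

lemma pvScatter_length (n : Int) (op : List (List Int)) (P : List (Int × Int))
    (st : List Int × List Bool) :
    (P.foldl (fun st pair =>
        pvAssignOne n op (pvAssignOne n op st pair.1 pair.2) pair.2 pair.1) st).1.length =
      st.1.length := by
  induction P generalizing st with
  | nil => rfl
  | cons pr P ih =>
    rw [List.foldl_cons, ih]
    rw [(pvAssignOne_length n op _ pr.2 pr.1).1, (pvAssignOne_length n op st pr.1 pr.2).1]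

lemma pvScatter_getD (op : List (List Int)) (P : List (Int × Int)) (st : List Int × List Bool)
    (h1 : st.1.length = op.length) (h2 : st.2.length = op.length) (k : Nat)
    (hk : k < op.length) :
    (P.foldl
      (fun st pair =>
        pvAssignOne (op.length : Int) op (pvAssignOne (op.length : Int) op st pair.1 pair.2)
          pair.2 pair.1) st).1.length = op.length ∧
    (P.foldl
      (fun st pair =>
        pvAssignOne (op.length : Int) op (pvAssignOne (op.length : Int) op st pair.1 pair.2)
          pair.2 pair.1) st).1.getD k 0 =
      (if st.2.getD k false = true then st.1.getD k 0
       else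
        match pvFindPartner ((k : Int) + 1) P with
        | some partner => pvDispOf (op.getD k []) partner
        | none => st.1.getD k 0) := by
  induction P generalizing st with
  | nil => exact ⟨h1, by simp [pvFindPartner]⟩
  | cons pr P ih =>
    obtain ⟨a, b⟩ := pr
    have hA := pvAssignOne_spec op st a b k hk h1 h2
    set st1 := pvAssignOne (op.length : Int) op st a b with hst1
    have hB := pvAssignOne_spec op st1 b a k hk hA.1 hA.2.1
    set st2 := pvAssignOne (op.length : Int) op st1 b a with hst2
    have hrec := ih st2 hB.1 hB.2.1
    refine ⟨hrec.1, ?_⟩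
    rw [List.foldl_cons]
    rw [show (List.foldl _ (pvAssignOne (op.length : Int) op
        (pvAssignOne (op.length : Int) op st (a, b).1 (a, b).2) (a, b).2 (a, b).1) P) =
        (List.foldl _ st2 P) from rfl]
    rw [hrec.2]
    simp only [pvFindPartner]
    by_cases ha : a = (k : Int) + 1 <;> by_cases hb : b = (k : Int) + 1
    · rw [if_pos ha] at hA; rw [if_pos hb] at hB
      rw [if_pos hB.2.2.2, hB.2.2.1, if_pos hA.2.2.2, hA.2.2.1, if_pos ha]
    · rw [if_pos ha] at hA; rw [if_neg hb] at hB
      rw [if_pos (hB.2.2.2.trans hA.2.2.2), hB.2.2.1, hA.2.2.1, if_pos ha]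
    · rw [if_neg ha] at hA; rw [if_pos hb] at hB
      rw [if_pos hB.2.2.2, hB.2.2.1, hA.2.2.2, hA.2.2.1, if_neg ha, if_pos hb]
    · rw [if_neg ha] at hA; rw [if_neg hb] at hB
      rw [hB.2.2.2, hA.2.2.2, hB.2.2.1, hA.2.2.1, if_neg ha, if_neg hb]

-- ===== VERDICT (by name: the statement is the Claim_ definition above) =====
theorem calculate_displacement_spec : Claim_equal_calculate_displacement := by
  intro op mp _
  unfold Spec_calculate_displacement calculate_displacement calculate_displacement_alt
  have hinit1 : (op.map (fun prefs => (prefs.length : Int))).length = op.length := by simp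
  have hinit2 : (op.map (fun _ : List Int => false)).length = op.length := by simp
  apply List.ext_getElem
  · rw [pvALoop_length, pvScatter_length, hinit1]
  · intro k hk1 hk2
    have hk : k < op.length := by simpa [pvALoop_length] using hk1
    have hS := pvScatter_getD op mp
      (op.map (fun prefs => (prefs.length : Int)), op.map (fun _ => false)) hinit1 hinit2 k hk
    rw [← List.getD_eq_getElem _ 0 hk1, ← List.getD_eq_getElem _ 0 hk2]
    rw [pvALoop_getD mp op 1 k hk, hS.2]
    have hm1 : (op.map (fun _ : List Int => false)).getD k false = false := by
      rw [List.getD_eq_getElem _ _ (by simpa using hk)]; simp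
    have hm2 : (op.map (fun prefs => (prefs.length : Int))).getD k 0 =
        ((op.getD k []).length : Int) := by
      rw [List.getD_eq_getElem _ _ (by simpa using hk), List.getD_eq_getElem _ _ hk]; simp
    rw [hm1, hm2]
    simp only [Bool.false_eq_true, if_false]
    rw [show (1 : Int) + k = (k : Int) + 1 by ring]
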